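-- pv_equiv track=rewrite | github.com/jasoncoon/ClockIOT | fabricate/langs/Simulate.py | bits2bytes
-- ===== SOURCE A (Python) =====
-- def bits2int(bits):
--     return int(sum([b * 2 ** i for i, b in enumerate(bits)]))
--
-- def bits2bytes(bits):
--     if len(bits) % 8 == 0:
--         n = len(bits) // 8
--     else:
--         n = len(bits) // 8 + 1
--     out = []
--     for i in range(n):
--         out.append(bits2int(bits[i * 8:(i + 1) * 8]))
--     return out
-- ===== SOURCE B (Python) =====
-- def bits2bytes(bits):
--     out = []
--     acc = 0
--     for i, b in enumerate(bits):
--         acc += b * 2 ** (i % 8)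
--         if i % 8 == 7:
--             out.append(int(acc))
--             acc = 0
--     if len(bits) % 8 != 0:
--         out.append(int(acc))
--     return out
-- ===== Notes on version B (the rewrite author's own statement) =====
-- stated objective: alternative
-- what changed: Replaced the ceiling-count/slice/helper decomposition by a single streaming pass that keeps a running per-byte accumulator (weight 2**(i%8)) and flushes it every 8 bits and once more for a trailing partial group.
import Mathlib
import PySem

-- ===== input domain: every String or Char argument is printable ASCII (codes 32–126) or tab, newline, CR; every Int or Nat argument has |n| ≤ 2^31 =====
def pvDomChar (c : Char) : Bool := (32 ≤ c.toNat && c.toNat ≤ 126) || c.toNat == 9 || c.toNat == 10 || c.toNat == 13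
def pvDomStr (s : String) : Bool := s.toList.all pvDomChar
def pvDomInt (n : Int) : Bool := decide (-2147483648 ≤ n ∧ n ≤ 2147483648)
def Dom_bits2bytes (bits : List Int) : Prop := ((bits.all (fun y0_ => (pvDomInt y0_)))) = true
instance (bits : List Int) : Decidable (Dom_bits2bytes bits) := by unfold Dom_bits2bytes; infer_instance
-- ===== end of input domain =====

-- B replaces A's ceiling-count/slice decomposition by one streaming pass with a running per-byte accumulator.

-- ===== PORT A =====
-- exact: enumerate indices are ≥ 0, so `.toNat` on them matches Python's 2 ** i
def bits2int (bits : List Int) : Int :=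
  ((PySem.List.enumerate bits).map (fun p => p.2 * 2 ^ p.1.toNat)).sum

def bits2bytes (bits : List Int) : List Int :=
  let n : Nat := if bits.length % 8 = 0 then bits.length / 8 else bits.length / 8 + 1
  (List.range n).foldl
    (fun out (i : Nat) =>
      out ++ [bits2int (PySem.List.slice bits (some ((i : Int) * 8)) (some (((i : Int) + 1) * 8)))])
    []

-- ===== PORT B =====
def runB : List Int → Nat → Int → List Int → List Int
  | [], i, acc, out => if i % 8 = 0 then out else out ++ [acc]
  | b :: rest, i, acc, out =>
      let acc' := acc + b * 2 ^ (i % 8)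
      if i % 8 = 7 then runB rest (i + 1) 0 (out ++ [acc'])
      else runB rest (i + 1) acc' out

def bits2bytes_alt (bits : List Int) : List Int := runB bits 0 0 []

-- ===== PRECONDITION & SPEC =====
def Spec_bits2bytes (bits : List Int) (out : List Int) : Prop := out = bits2bytes_alt bits
instance (bits : List Int) (out : List Int) : Decidable (Spec_bits2bytes bits out) := by unfold Spec_bits2bytes; infer_instance

-- ===== CLAIM (what is proved, stated in full; the proofs are below) =====
def Claim_equal_bits2bytes : Prop := ∀ (bits : List Int), Dom_bits2bytes bits → Spec_bits2bytes bits (bits2bytes bits)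

-- ===== LEMMAS AND PROOFS =====

/-- Common reference form: the weighted byte values, chunk by chunk. -/
def chunks (l : List Int) : List Int :=
  if h : l = [] then [] else bits2int (l.take 8) :: chunks (l.drop 8)
termination_by l.length
decreasing_by
  have : 0 < l.length := List.length_pos_iff.mpr h
  simp; omega

lemma foldl_app {α : Type} (f : α → Int) :
    ∀ (l : List α) (acc : List Int),
      l.foldl (fun out i => out ++ [f i]) acc = acc ++ l.map f := by
  intro l
  induction l with
  | nil => simp
  | cons x xs ih => intro acc; simp [List.foldl, ih]

lemma slice8 (bits : List Int) (i : Nat) :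
    PySem.List.slice bits (some ((i : Int) * 8)) (some (((i : Int) + 1) * 8))
      = (bits.drop (8 * i)).take 8 := by
  have h1 : ((i : Int) * 8) = ((8 * i : Nat) : Int) := by push_cast; ring
  have h2 : (((i : Int) + 1) * 8) = ((8 * i + 8 : Nat) : Int) := by push_cast; ring
  rw [h1, h2, PySem.List.slice_natCast]
  congr 1
  omega

lemma chunks_nil : chunks [] = [] := by
  rw [chunks]; simp

lemma chunks_cons8 (b0 b1 b2 b3 b4 b5 b6 b7 : Int) (rest : List Int) :
    chunks (b0 :: b1 :: b2 :: b3 :: b4 :: b5 :: b6 :: b7 :: rest)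
      = bits2int [b0, b1, b2, b3, b4, b5, b6, b7] :: chunks rest := by
  rw [chunks]; simp

lemma A_eq_chunks : ∀ (n : Nat) (bits : List Int),
    n = (if bits.length % 8 = 0 then bits.length / 8 else bits.length / 8 + 1) →
    (List.range n).map (fun i => bits2int ((bits.drop (8 * i)).take 8)) = chunks bits := by
  intro n
  induction n with
  | zero =>
    intro bits h
    have hb : bits.length = 0 := by
      by_cases hm : bits.length % 8 = 0
      · rw [if_pos hm] at h; omega
      · rw [if_neg hm] at h; omega
    have : bits = [] := List.length_eq_zero_iff.mp hb
    subst this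
    rw [chunks_nil]; simp
  | succ n ih =>
    intro bits h
    have hne : bits ≠ [] := by
      intro hb; subst hb; simp at h
    have hlen : 0 < bits.length := List.length_pos_iff.mpr hne
    rw [List.range_succ_eq_map, List.map_cons, List.map_map]
    have hrec : ((List.range n).map ((fun i => bits2int ((bits.drop (8 * i)).take 8)) ∘ (· + 1)))
        = (List.range n).map (fun i => bits2int (((bits.drop 8).drop (8 * i)).take 8)) := by
      apply List.map_congr_left
      intro i _
      simp only [Function.comp, List.drop_drop]
      rw [show 8 * (i + 1) = 8 + 8 * i from by ring]
    rw [hrec, ih (bits.drop 8) ?_]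
    · conv_rhs => rw [chunks]
      rw [dif_neg hne]
      simp
    · have hd : (bits.drop 8).length = bits.length - 8 := by simp
      rw [hd]
      by_cases hm : bits.length % 8 = 0 <;>
        [rw [if_pos hm] at h; rw [if_neg hm] at h] <;>
        by_cases hm2 : (bits.length - 8) % 8 = 0 <;>
        [rw [if_pos hm2]; rw [if_neg hm2]; rw [if_pos hm2]; rw [if_neg hm2]] <;> omega

lemma runB_chunks : ∀ (m : Nat) (bits : List Int), bits.length ≤ m →
    ∀ (i : Nat) (out : List Int), i % 8 = 0 → runB bits i 0 out = out ++ chunks bits := by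
  intro m
  induction m with
  | zero =>
    intro bits hlen i out hi
    have : bits = [] := by
      cases bits with
      | nil => rfl
      | cons a l => simp at hlen
    subst this
    rw [chunks_nil]
    simp [runB, hi]
  | succ m ih =>
    intro bits hlen i out hi
    match bits with
    | [] =>
      rw [chunks_nil]; simp [runB, hi]
    | [b0] =>
      rw [chunks]
      simp [runB, hi, show (i+1) % 8 = 1 by omega, bits2int, PySem.List.enumerate, chunks_nil]
      try ring
    | [b0, b1] =>
      rw [chunks]
      simp [runB, hi, show (i+1) % 8 = 1 by omega, show (i+2) % 8 = 2 by omega,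
        bits2int, PySem.List.enumerate, chunks_nil]
      try ring
    | [b0, b1, b2] =>
      rw [chunks]
      simp [runB, hi, show (i+1) % 8 = 1 by omega, show (i+2) % 8 = 2 by omega,
        show (i+3) % 8 = 3 by omega, bits2int, PySem.List.enumerate, chunks_nil]
      try ring
    | [b0, b1, b2, b3] =>
      rw [chunks]
      simp [runB, hi, show (i+1) % 8 = 1 by omega, show (i+2) % 8 = 2 by omega,
        show (i+3) % 8 = 3 by omega, show (i+4) % 8 = 4 by omega,
        bits2int, PySem.List.enumerate, chunks_nil]
      try ring
    | [b0, b1, b2, b3, b4] =>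
      rw [chunks]
      simp [runB, hi, show (i+1) % 8 = 1 by omega, show (i+2) % 8 = 2 by omega,
        show (i+3) % 8 = 3 by omega, show (i+4) % 8 = 4 by omega,
        show (i+5) % 8 = 5 by omega, bits2int, PySem.List.enumerate, chunks_nil]
      try ring
    | [b0, b1, b2, b3, b4, b5] =>
      rw [chunks]
      simp [runB, hi, show (i+1) % 8 = 1 by omega, show (i+2) % 8 = 2 by omega,
        show (i+3) % 8 = 3 by omega, show (i+4) % 8 = 4 by omega,
        show (i+5) % 8 = 5 by omega, show (i+6) % 8 = 6 by omega,
        bits2int, PySem.List.enumerate, chunks_nil]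
      try ring
    | [b0, b1, b2, b3, b4, b5, b6] =>
      rw [chunks]
      simp [runB, hi, show (i+1) % 8 = 1 by omega, show (i+2) % 8 = 2 by omega,
        show (i+3) % 8 = 3 by omega, show (i+4) % 8 = 4 by omega,
        show (i+5) % 8 = 5 by omega, show (i+6) % 8 = 6 by omega,
        show (i+7) % 8 = 7 by omega, bits2int, PySem.List.enumerate, chunks_nil]
      try ring
    | b0 :: b1 :: b2 :: b3 :: b4 :: b5 :: b6 :: b7 :: rest =>
      have hr : rest.length ≤ m := by simp at hlen; omega
      simp only [runB, hi, show (i+1) % 8 = 1 by omega, show (i+2) % 8 = 2 by omega,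
        show (i+3) % 8 = 3 by omega, show (i+4) % 8 = 4 by omega,
        show (i+5) % 8 = 5 by omega, show (i+6) % 8 = 6 by omega,
        show (i+7) % 8 = 7 by omega]
      norm_num
      rw [ih rest hr (i + 8) _ (by omega), chunks_cons8]
      simp [bits2int, PySem.List.enumerate]
      try ring

-- ===== VERDICT (by name: the statement is the Claim_ definition above) =====
theorem bits2bytes_spec : Claim_equal_bits2bytes := by
  intro bits _
  show bits2bytes bits = bits2bytes_alt bits
  have hB : bits2bytes_alt bits = chunks bits := by
    unfold bits2bytes_alt
    rw [runB_chunks bits.length bits le_rfl 0 [] (by omega)]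
    simp
  have hA : bits2bytes bits = chunks bits := by
    simp only [bits2bytes, foldl_app, List.nil_append]
    rw [← A_eq_chunks _ bits rfl]
    apply List.map_congr_left
    intro i _
    rw [slice8]
  rw [hA, hB]
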